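-- pv_equiv track=rewrite | github.com/DanielZaBV/Proyecto_python | Analisis_coloriespaciales/scripts/analisis_color.py | merge_similar_colors
-- ===== SOURCE A (Python) =====
-- def round_color_value(color_value, round_to=20):
--     """
--     Redondea un valor de color al múltiplo más cercano de un valor especificado.
--
--     Parameters:
--     - color_value (int): El valor de color que se va a redondear.
--     - round_to (int, optional): El múltiplo al que se redondeará el valor de color. Por defecto es 20.
--
--     Returns:
--     - int: El valor de color redondeado al múltiplo más cercano de `round_to`.
--     """
--     return round_to * round(color_value / round_to)
--
-- def merge_similar_colors(colors, threshold=20):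
--     """
--     Agrupa y cuenta colores similares basados en un umbral especificado.
--
--     Parameters:
--     - colors (list): Lista de tuplas que representan los valores RGB de los colores.
--     - threshold (int, optional): Umbral para agrupar colores similares. Por defecto es 20.
--
--     Returns:
--     - dict: Un diccionario donde las claves son los colores redondeados a los múltiplos más cercanos del umbral,
--             y los valores son la cantidad de veces que cada color aparece en la lista original.
--     """
--     merged = {}
--     for color in colors:
--         rounded_color = tuple(round_color_value(c, round_to=threshold) for c in color)
--         if rounded_color in merged:
--             merged[rounded_color] += 1
--         else:
--             merged[rounded_color] = 1
--     return merged
-- ===== SOURCE B (Python) =====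
-- def merge_similar_colors(colors, threshold=20):
--     # Different decomposition: round everything once, then repeatedly extract the
--     # first remaining key, count it as a length difference of a partition filter,
--     # and continue on the remainder; no per-element hash-table accumulation.
--     rounded = [tuple(threshold * round(c / threshold) for c in color) for color in colors]
--     pairs = []
--     pending = rounded
--     while pending:
--         key = pending[0]
--         rest = [k for k in pending if k != key]
--         pairs.append((key, len(pending) - len(rest)))
--         pending = rest
--     return dict(pairs)
-- ===== Notes on version B (the rewrite author's own statement) =====
-- stated objective: alternative
-- what changed: Replaces A's per-element dict accumulation with repeated partition extraction: round all colors once, then peel off the first remaining key, obtain its count as the length drop of a filter, and recurse on the remainder; the dict is assembled once at the end from distinct keys.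
-- outside the precondition, e.g. on merge_similar_colors([(1, 2, 3)], 0): A raises ZeroDivisionError, B raises ZeroDivisionError
import Mathlib
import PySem

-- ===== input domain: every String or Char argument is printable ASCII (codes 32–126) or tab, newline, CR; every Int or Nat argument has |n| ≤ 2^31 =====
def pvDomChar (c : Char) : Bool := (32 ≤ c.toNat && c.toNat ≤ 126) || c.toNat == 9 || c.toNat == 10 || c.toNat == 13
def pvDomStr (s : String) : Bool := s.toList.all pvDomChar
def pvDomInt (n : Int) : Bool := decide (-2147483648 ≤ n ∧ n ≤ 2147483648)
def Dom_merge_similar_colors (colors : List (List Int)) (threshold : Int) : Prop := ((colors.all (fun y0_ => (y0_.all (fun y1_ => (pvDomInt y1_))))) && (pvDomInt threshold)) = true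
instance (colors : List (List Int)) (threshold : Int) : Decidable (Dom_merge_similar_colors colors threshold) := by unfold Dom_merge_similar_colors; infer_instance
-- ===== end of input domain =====

-- ===== PORT A =====
-- B replaces A's per-element dict accumulation by repeated partition extraction:
-- round once, then peel off the first remaining key, count it as a length drop of a filter,
-- and continue on the remainder; the dict is assembled once at the end.
-- round(c / threshold): Python rounds the FLOAT c/threshold half-to-even; for |c| <= 2^31 (Dom)
-- the float quotient never crosses or fakes a half-integer boundary (|c| < 2^52 gives
-- abs error <= |c|/|t|*2^-53 < 1/(2|t|)), so banker's rounding of the exact rational c/t below is exact.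
def pyRoundDiv (c t : Int) : Int :=
  let q := PySem.Int.floordiv c t
  let r := PySem.Int.mod c t
  if 2 * r = t then (if PySem.Int.mod q 2 = 0 then q else q + 1)
  else if (0 < t ∧ 2 * r < t) ∨ (t < 0 ∧ t < 2 * r) then q else q + 1

-- round_color_value(c, round_to) = round_to * round(c / round_to)  (helper of the Python A)
def round_color_value (color_value round_to : Int) : Int :=
  round_to * pyRoundDiv color_value round_to

def merge_similar_colors (colors : List (List Int)) (threshold : Int) : List (List Int × Int) :=
  (colors.foldl
    (fun merged color =>
      let rounded_color := color.map (fun c => round_color_value c threshold)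
      if merged.contains rounded_color then
        merged.insert rounded_color (merged.getD rounded_color 0 + 1)
      else
        merged.insert rounded_color 1)
    PySem.Dict.empty).items

-- ===== PORT B =====
-- the `while pending:` loop of Source B; each iteration emits one pair, in loop order
def pvGroup (pending : List (List Int)) : List (List Int × Int) :=
  match pending with
  | [] => []
  | key :: tl =>
    let rest := (key :: tl).filter (fun k => k ≠ key)
    (key, ((key :: tl).length : Int) - (rest.length : Int)) :: pvGroup rest
termination_by pending.length
decreasing_by
  simp only [List.filter_cons]
  have := List.length_filter_le (fun k => decide (k ≠ key)) tl
  simp at *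
  omega

def merge_similar_colors_alt (colors : List (List Int)) (threshold : Int) : List (List Int × Int) :=
  let rounded := colors.map (fun color => color.map (fun c => round_color_value c threshold))
  -- dict(pairs): insert each pair in order (keys here are distinct)
  ((pvGroup rounded).foldl (fun d p => d.insert p.1 p.2) PySem.Dict.empty).items

-- ===== PRECONDITION & SPEC =====
-- Pre_ excludes only threshold = 0, where A raises ZeroDivisionError.
def Pre_merge_similar_colors (colors : List (List Int)) (threshold : Int) : Prop := threshold ≠ 0
instance (colors : List (List Int)) (threshold : Int) : Decidable (Pre_merge_similar_colors colors threshold) := by unfold Pre_merge_similar_colors; infer_instance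
def pvWitness_merge_similar_colors : List (List Int) × Int := ([[10, 25, 30], [12, 28, 30]], 20)
def Spec_merge_similar_colors (colors : List (List Int)) (threshold : Int) (out : List (List Int × Int)) : Prop := out = merge_similar_colors_alt colors threshold
instance (colors : List (List Int)) (threshold : Int) (out : List (List Int × Int)) : Decidable (Spec_merge_similar_colors colors threshold out) := by unfold Spec_merge_similar_colors; infer_instance

-- ===== CLAIM (what is proved, stated in full; the proofs are below) =====
def Claim_equal_merge_similar_colors : Prop := ∀ (colors : List (List Int)) (threshold : Int), Dom_merge_similar_colors colors threshold → Pre_merge_similar_colors colors threshold → Spec_merge_similar_colors colors threshold (merge_similar_colors colors threshold)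

-- ===== LEMMAS AND PROOFS =====
-- the two branches of A's loop body are both 'insert key (getD key 0 + 1)'
lemma step_eq (d : PySem.Dict (List Int) Int) (k : List Int) :
    (if d.contains k then d.insert k (d.getD k 0 + 1) else d.insert k 1) =
      d.insert k (d.getD k 0 + 1) := by
  by_cases h : d.contains k = true
  · simp [h]
  · simp only [Bool.not_eq_true] at h
    rw [if_neg (by simp [h]), PySem.Dict.getD_of_not_contains (h := h)]
    norm_num

-- PySem.Set.ofList commutes with List.filter
lemma ofList_filter (p : List Int → Bool) (l : List (List Int)) :
    PySem.Set.ofList (l.filter p) = List.filter p (PySem.Set.ofList l) := by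
  induction l with
  | nil => simp [PySem.Set.ofList, PySem.Set.empty]
  | cons a l ih =>
    by_cases hp : p a = true
    · rw [List.filter_cons_of_pos hp, PySem.Set.ofList_cons, PySem.Set.ofList_cons,
        List.filter_cons_of_pos hp, ih]
      unfold PySem.Set.discard
      rw [List.filter_filter, List.filter_filter]
      exact congrArg _ (List.filter_congr (fun x _ => by rw [Bool.and_comm]))
    · have hp' : p a = false := by revert hp; cases p a <;> simp
      rw [List.filter_cons_of_neg (by simp [hp']), PySem.Set.ofList_cons,
        List.filter_cons_of_neg (by simp [hp']), ih]
      unfold PySem.Set.discard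
      rw [List.filter_filter]
      exact List.filter_congr (fun x _ => by
        by_cases hx : x = a
        · subst hx; simp [hp']
        · simp [hx])

-- the per-iteration count of Source B's loop: length drop of the filter = count of the key
lemma length_sub_filter (key : List Int) (t : List (List Int)) :
    ((key :: t).length : Int) - ((t.filter (fun k => k ≠ key)).length : Int)
      = (((key :: t).count key : Nat) : Int) := by
  have h1 : (t.filter (fun k => decide (k ≠ key))).length
      = t.countP (fun k => decide (k ≠ key)) := List.countP_eq_length_filter.symm
  have h2 := List.length_eq_countP_add_countP (fun k : List Int => decide (k ≠ key)) (l := key :: t)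
  have h4 : (key :: t).countP (fun k => decide (k ≠ key)) = t.countP (fun k => decide (k ≠ key)) := by
    simp
  have h3 : (key :: t).count key = (key :: t).countP (fun k => decide ¬(decide (k ≠ key)) = true) := by
    rw [List.count_eq_countP]
    exact List.countP_congr (fun x _ => by by_cases hx : x = key <;> simp [hx])
  omega

-- characterization of Source B's loop: distinct keys in first-occurrence order with their counts
lemma group_eq : ∀ (n : Nat) (xs : List (List Int)), xs.length ≤ n →
    pvGroup xs = (PySem.Set.ofList xs).map (fun k => (k, (xs.count k : Int))) := by
  intro n
  induction n with
  | zero =>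
    intro xs h
    have : xs = [] := List.eq_nil_of_length_eq_zero (Nat.le_zero.mp h)
    subst this
    rw [pvGroup.eq_def]
    simp [PySem.Set.ofList, PySem.Set.empty]
  | succ n ih =>
    intro xs h
    match xs with
    | [] =>
      rw [pvGroup.eq_def]
      simp [PySem.Set.ofList, PySem.Set.empty]
    | key :: t =>
      rw [pvGroup.eq_def]
      simp only []
      have hrest : (key :: t).filter (fun k => k ≠ key) = t.filter (fun k => k ≠ key) := by simp
      have hlen : (t.filter (fun k => k ≠ key)).length ≤ n := by
        have := List.length_filter_le (fun k => decide (k ≠ key)) t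
        simp only [List.length_cons] at h
        omega
      rw [hrest, ih _ hlen]
      rw [PySem.Set.ofList_cons, List.map_cons]
      have hpred : (fun k : List Int => decide (k ≠ key)) = (fun k => !(k == key)) := by
        funext k; simp [decide_not, beq_eq_decide]
      congr 1
      · exact congrArg _ (length_sub_filter key t)
      · rw [ofList_filter]
        unfold PySem.Set.discard
        rw [← hpred]
        apply List.map_congr_left
        intro k hk
        have hk' : k ≠ key := by
          have := List.of_mem_filter hk
          simpa using this
        congr 1
        rw [List.count_filter (by simpa using hk')]
        simp [Ne.symm hk']

-- keys emitted by pvGroup are the distinct rounded colors, hence Nodup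
lemma group_keys_nodup (xs : List (List Int)) :
    ((pvGroup xs).map Prod.fst).Nodup := by
  rw [group_eq xs.length xs le_rfl, List.map_map]
  have hid : (Prod.fst ∘ fun k : List Int => (k, ((xs.count k : Nat) : Int))) = id := rfl
  rw [hid, List.map_id]
  exact PySem.Set.nodup_ofList xs

-- ===== VERDICT (by name: the statement is the Claim_ definition above) =====
theorem merge_similar_colors_spec : Claim_equal_merge_similar_colors := by
  intro colors threshold _ _
  unfold Spec_merge_similar_colors
  -- B's dict(pairs) over the fresh distinct keys of pvGroup is the pairs list itself
  have hB : merge_similar_colors_alt colors threshold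
      = (PySem.Set.ofList (colors.map (fun color => color.map (fun c => round_color_value c threshold)))).map
          (fun k => (k, ((colors.map (fun color => color.map (fun c => round_color_value c threshold))).count k : Int))) := by
    unfold merge_similar_colors_alt
    rw [PySem.Dict.items_foldl_insert_fresh
          (pvGroup (colors.map (fun color => color.map (fun c => round_color_value c threshold))))
          Prod.fst Prod.snd PySem.Dict.empty
          (fun a _ => PySem.Dict.contains_empty a.1)
          (group_keys_nodup (colors.map (fun color => color.map (fun c => round_color_value c threshold))))]
    rw [group_eq _ _ le_rfl]
    simp [PySem.Dict.empty]
  rw [hB]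
  -- A's loop is the counter of the rounded list
  unfold merge_similar_colors
  have hfe : (fun (merged : PySem.Dict (List Int) Int) (color : List Int) =>
      let rounded_color := color.map (fun c => round_color_value c threshold)
      if merged.contains rounded_color then
        merged.insert rounded_color (merged.getD rounded_color 0 + 1)
      else
        merged.insert rounded_color 1) =
      (fun merged color =>
        merged.insert (color.map (fun c => round_color_value c threshold))
          (merged.getD (color.map (fun c => round_color_value c threshold)) 0 + 1)) := by
    funext d c
    exact step_eq d (c.map (fun c => round_color_value c threshold))
  rw [hfe]
  rw [show (List.foldl
        (fun (merged : PySem.Dict (List Int) Int) color =>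
          merged.insert (List.map (fun c => round_color_value c threshold) color)
            (merged.getD (List.map (fun c => round_color_value c threshold) color) 0 + 1))
        PySem.Dict.empty colors)
      = List.foldl (fun (d : PySem.Dict (List Int) Int) k => d.insert k (d.getD k 0 + 1))
          PySem.Dict.empty (colors.map (fun color => color.map (fun c => round_color_value c threshold)))
      from by rw [List.foldl_map],
    PySem.Dict.foldl_insert_getD_add_one_eq_counter, PySem.Dict.items_counter]
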